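-- pv_equiv track=rewrite | github.com/torukubota2023/bed-control-simulator | scripts/bed_map_ui.py | _get_display_rows
-- ===== SOURCE A (Python) =====
-- _DISPLAY_ROWS_6F = [
--     # Row 1: 個室ゾーン
--     ["602", "603", "605", "606", "607", "608", "610"],
--     # Row 2: 特室 + 個室
--     ["612", "613", "615", "616", "617", "628", "630"],
--     # Row 3: 4人部屋（前半）
--     ["601", "618", "620", "621", "622", "623"],
--     # Row 4: 4人部屋（後半）+ 2人部屋
--     ["625", "626", "627", "631"],
-- ]
--
-- def _get_display_rows(ward: str) -> list[list[str]]: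
--     """病棟に応じた表示行リストを返す。"""
--     if ward == "6F":
--         return _DISPLAY_ROWS_6F
--     # 5F: 番号を 5xx に変換。611(倉庫)→511(個室) の違いを反映
--     rows = []
--     for row in _DISPLAY_ROWS_6F:
--         new_row = []
--         for room in row:
--             room_5f = f"5{room[1:]}"
--             # 611(倉庫)は6Fのみ。5Fでは511(個室)として含める
--             if room == "611":
--                 continue
--             new_row.append(room_5f)
--         rows.append(new_row)
--     # 511を個室ゾーン（Row 1）の末尾に追加
--     rows[0].append("511")
--     return rows
-- ===== SOURCE B (Python) =====
-- _DISPLAY_ROWS_6F = [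
--     ["602", "603", "605", "606", "607", "608", "610"],
--     ["612", "613", "615", "616", "617", "628", "630"],
--     ["601", "618", "620", "621", "622", "623"],
--     ["625", "626", "627", "631"],
-- ]
--
-- # precomputed 5F rows (the 611-skip branch in A is dead; 511 sits at the end of row 1)
-- _DISPLAY_ROWS_5F = [
--     ["502", "503", "505", "506", "507", "508", "510", "511"],
--     ["512", "513", "515", "516", "517", "528", "530"],
--     ["501", "518", "520", "521", "522", "523"],
--     ["525", "526", "527", "531"],
-- ]
--
-- def _get_display_rows(ward: str) -> list[list[str]]:
--     return _DISPLAY_ROWS_6F if ward == "6F" else _DISPLAY_ROWS_5F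
-- ===== Notes on version B (the rewrite author's own statement) =====
-- stated objective: simpler
-- what changed: Replaces the nested loop that derives 5F rows from the 6F constant (slice, dead 611 skip, appended 511) with a second precomputed constant table and a single branch.
import Mathlib
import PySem

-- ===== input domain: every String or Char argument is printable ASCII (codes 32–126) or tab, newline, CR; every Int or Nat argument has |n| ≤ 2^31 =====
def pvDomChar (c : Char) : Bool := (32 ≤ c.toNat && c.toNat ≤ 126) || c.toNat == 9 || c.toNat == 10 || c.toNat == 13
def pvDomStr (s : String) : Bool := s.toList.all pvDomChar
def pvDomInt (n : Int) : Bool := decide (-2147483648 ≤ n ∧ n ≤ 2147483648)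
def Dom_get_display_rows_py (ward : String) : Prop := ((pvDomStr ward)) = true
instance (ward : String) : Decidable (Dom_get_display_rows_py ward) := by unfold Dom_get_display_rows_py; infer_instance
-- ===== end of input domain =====

-- B replaces A's derive-5F-from-6F nested loop by a second precomputed constant table and a single branch (objective: simpler).

-- ===== PORT A =====
def pvDisplayRows6F : List (List String) :=
  [ ["602", "603", "605", "606", "607", "608", "610"],
    ["612", "613", "615", "616", "617", "628", "630"],
    ["601", "618", "620", "621", "622", "623"],
    ["625", "626", "627", "631"] ]

-- f"5{room[1:]}"; room[1:] via PySem.Str.slice, exact on this domain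
def pvRoom5F (room : String) : String :=
  String.ofList ('5' :: (PySem.Str.slice room (some 1) none).toList)

def get_display_rows_py (ward : String) : List (List String) :=
  if ward == "6F" then pvDisplayRows6F
  else
    let rows := pvDisplayRows6F.foldl (fun rows row =>
      let new_row := row.foldl (fun new_row room =>
        let room_5f := pvRoom5F room
        if room == "611" then new_row
        else new_row ++ [room_5f]) []
      rows ++ [new_row]) []
    -- rows[0].append("511"): the first row gains "511" at the end
    match rows with
    | [] => []   -- unreachable (rows has 4 elements)
    | r :: rs => (r ++ ["511"]) :: rs

-- ===== PORT B =====
def pvDisplayRows5F : List (List String) :=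
  [ ["502", "503", "505", "506", "507", "508", "510", "511"],
    ["512", "513", "515", "516", "517", "528", "530"],
    ["501", "518", "520", "521", "522", "523"],
    ["525", "526", "527", "531"] ]

def get_display_rows_py_alt (ward : String) : List (List String) :=
  if ward == "6F" then pvDisplayRows6F else pvDisplayRows5F

-- ===== PRECONDITION & SPEC =====
def Spec_get_display_rows_py (ward : String) (out : List (List String)) : Prop := out = get_display_rows_py_alt ward
instance (ward : String) (out : List (List String)) : Decidable (Spec_get_display_rows_py ward out) := by unfold Spec_get_display_rows_py; infer_instance

-- ===== CLAIM (what is proved, stated in full; the proofs are below) =====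
def Claim_equal_get_display_rows_py : Prop := ∀ (ward : String), Dom_get_display_rows_py ward → Spec_get_display_rows_py ward (get_display_rows_py ward)

-- ===== LEMMAS AND PROOFS =====

-- ===== VERDICT (by name: the statement is the Claim_ definition above) =====
theorem get_display_rows_py_spec : Claim_equal_get_display_rows_py := by
  intro ward _
  unfold Spec_get_display_rows_py get_display_rows_py get_display_rows_py_alt
  by_cases h : ward == "6F"
  · simp [h]
  · simp only [h]
    decide
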